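-- pv_equiv track=rewrite | github.com/guigui55-ok/Repository4_python | zzz/.vscode/250426/a078.py | conret_table_for_block_down
-- ===== SOURCE A (Python) =====
-- def conret_table_for_block_down(block_lines: 'list(str)'):
--     # 1×1以上を想定
--     ret_list = []
--     for i in range(len(block_lines[0])):
--         new_line = ""
--         for line in reversed(block_lines):
--             new_line += line[i]
--         ret_list.append(new_line)
--     return ret_list
-- ===== SOURCE B (Python) =====
-- def conret_table_for_block_down(block_lines: 'list(str)'):
--     # Single row-major pass: one character buffer per output column, appended to
--     # in original row order; each output string is the buffer joined in reverse.
--     width = len(block_lines[0])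
--     cols = [[] for _ in range(width)]
--     for line in block_lines:
--         for j in range(width):
--             cols[j].append(line[j])
--     return ["".join(reversed(c)) for c in cols]
-- ===== Notes on version B (the rewrite author's own statement) =====
-- stated objective: alternative
-- what changed: Inverted the traversal: instead of A's column-major nested loop that re-scans the reversed rows concatenating character by character for each output string, B makes one row-major pass over the rows in original order, appending each row's characters to per-column buffers, and joins each buffer in reverse at the end.
import Mathlib
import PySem

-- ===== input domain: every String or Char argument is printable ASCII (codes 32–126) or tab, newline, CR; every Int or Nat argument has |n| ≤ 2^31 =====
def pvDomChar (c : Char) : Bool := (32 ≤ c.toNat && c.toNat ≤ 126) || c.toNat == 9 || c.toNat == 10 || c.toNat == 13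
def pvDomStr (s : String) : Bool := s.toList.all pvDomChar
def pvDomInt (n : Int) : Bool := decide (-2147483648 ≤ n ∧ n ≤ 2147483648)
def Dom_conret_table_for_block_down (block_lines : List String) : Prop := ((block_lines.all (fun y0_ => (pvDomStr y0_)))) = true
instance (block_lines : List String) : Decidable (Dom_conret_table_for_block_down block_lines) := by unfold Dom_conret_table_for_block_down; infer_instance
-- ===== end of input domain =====

-- B makes a single row-major pass over the rows in original order, appending each row's
-- characters to per-column buffers joined in reverse at the end, instead of A's column-major
-- nested loop re-scanning the reversed rows per column (alternative; same asymptotic cost).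

-- ===== PORT A =====
-- block_lines[0] and line[i] raise IndexError exactly where pyGet? is none; those inputs are excluded
-- by Pre_, so the .getD defaults are never reached inside the claim. new_line is built as a List Char
-- (PySem's string representation) and wrapped with String.ofList when appended.
def conret_table_for_block_down (block_lines : List String) : List String :=
  let first := (PySem.List.pyGet? block_lines 0).getD ""
  (PySem.List.pyRange 0 (PySem.Str.len first) 1).foldl
    (fun ret i =>
      ret ++ [String.ofList (block_lines.reverse.foldl
        (fun nl line => nl ++ [(PySem.Str.pyGet? line i).getD ' ']) [])]) []

-- ===== PORT B =====
-- cols is the list of per-column char buffers; 'cols[j].append(line[j])' is cols.set j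
-- (append at the end); '"".join(reversed(c))' is String.ofList c.reverse.
def conret_table_for_block_down_alt (block_lines : List String) : List String :=
  let width := PySem.Str.len ((PySem.List.pyGet? block_lines 0).getD "")
  let cols := block_lines.foldl
    (fun cols line =>
      (PySem.List.pyRange 0 width 1).foldl
        (fun a j => a.set j.toNat
          (a.getD j.toNat [] ++ [(PySem.Str.pyGet? line j).getD ' ']))
        cols)
    (List.replicate width.toNat ([] : List Char))
  cols.map (fun c => String.ofList c.reverse)

-- ===== PRECONDITION & SPEC =====
-- Pre_ excludes exactly the inputs where A raises IndexError: the empty list (block_lines[0])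
-- and lists where some line is shorter than the first line (line[i] out of range).
def Pre_conret_table_for_block_down (block_lines : List String) : Prop :=
  block_lines ≠ [] ∧ ∀ l ∈ block_lines, (block_lines.headD "").toList.length ≤ l.toList.length
instance (block_lines : List String) : Decidable (Pre_conret_table_for_block_down block_lines) := by
  unfold Pre_conret_table_for_block_down; infer_instance

def pvWitness_conret_table_for_block_down : List String := ["ab", "cd", "ef"]

def Spec_conret_table_for_block_down (block_lines : List String) (out : List String) : Prop := out = conret_table_for_block_down_alt block_lines
instance (block_lines : List String) (out : List String) : Decidable (Spec_conret_table_for_block_down block_lines out) := by unfold Spec_conret_table_for_block_down; infer_instance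

-- ===== CLAIM (what is proved, stated in full; the proofs are below) =====
def Claim_equal_conret_table_for_block_down : Prop := ∀ (block_lines : List String), Dom_conret_table_for_block_down block_lines → Pre_conret_table_for_block_down block_lines → Spec_conret_table_for_block_down block_lines (conret_table_for_block_down block_lines)

-- ===== LEMMAS AND PROOFS =====

-- One inner pass over the column indices prepends f j to column j, for every j < m ≤ acc.length.
lemma inner_fold_eq (f : Nat → Char) (acc : List (List Char)) :
    ∀ m ≤ acc.length,
      (List.range m).foldl (fun a j => a.set j (a.getD j [] ++ [f j])) acc
        = (List.range m).map (fun j => acc.getD j [] ++ [f j]) ++ acc.drop m := by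
  intro m
  induction m with
  | zero => simp
  | succ m ih =>
    intro hm
    have hm' : m ≤ acc.length := by omega
    have hlt : m < acc.length := by omega
    rw [List.range_succ, List.foldl_append, ih hm']
    have hdrop : acc.drop m = acc[m] :: acc.drop (m + 1) :=
      List.drop_eq_getElem_cons hlt
    have hlenmap : ((List.range m).map (fun j => acc.getD j [] ++ [f j])).length = m := by simp
    simp only [List.foldl_cons, List.foldl_nil]
    rw [hdrop]
    have hgetD : (((List.range m).map (fun j => acc.getD j [] ++ [f j])) ++
        (acc[m] :: acc.drop (m + 1))).getD m [] = acc[m] := by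
      rw [List.getD_eq_getElem?_getD, List.getElem?_append_right (by omega)]
      simp [List.getElem?_eq_getElem hlt]
    rw [hgetD, List.set_append]
    simp only [hlenmap, Nat.sub_self, List.set_cons_zero, if_neg (by omega : ¬ m < m)]
    rw [List.map_append]
    simp [List.getD_eq_getElem?_getD, hlt]
  
-- Folding B's outer loop over the rows, starting from columns g, appends the rows' characters
-- in row order to each column buffer.
lemma outer_fold_eq (n : Nat) (rows : List String) :
    ∀ g : Nat → List Char,
      rows.foldl
        (fun acc line => (List.range n).foldl
          (fun a j => a.set j (a.getD j [] ++ [(PySem.Str.pyGet? line (j : Int)).getD ' ']))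
          acc)
        ((List.range n).map g)
      = (List.range n).map
          (fun (j : Nat) => g j ++ rows.map (fun line => (PySem.Str.pyGet? line (j : Int)).getD ' ')) := by
  induction rows with
  | nil => simp
  | cons line rows ih =>
    intro g
    rw [List.foldl_cons]
    have hlen : ((List.range n).map g).length = n := by simp
    rw [inner_fold_eq (fun j => (PySem.Str.pyGet? line (j : Int)).getD ' ')
        ((List.range n).map g) n (le_of_eq hlen.symm)]
    rw [List.drop_eq_nil_of_le (le_of_eq hlen), List.append_nil]
    have hmap : (List.range n).map (fun (j : Nat) =>
        ((List.range n).map g).getD j [] ++ [(PySem.Str.pyGet? line (j : Int)).getD ' ']) =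
        (List.range n).map (fun (j : Nat) =>
        g j ++ [(PySem.Str.pyGet? line (j : Int)).getD ' ']) := by
      apply List.map_congr_left
      intro j hj
      have : j < n := List.mem_range.mp hj
      simp [List.getD_eq_getElem?_getD, this]
    rw [hmap, ih (fun j => g j ++ [(PySem.Str.pyGet? line (j : Int)).getD ' '])]
    apply List.map_congr_left
    intro j _
    simp

theorem conret_table_for_block_down_spec : Claim_equal_conret_table_for_block_down := by
  intro bl _ hpre
  obtain ⟨hne, hall⟩ := hpre
  unfold Spec_conret_table_for_block_down
  cases bl with
  | nil => exact absurd rfl hne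
  | cons f rest =>
    simp only [List.headD_cons] at hall
    set n : Nat := f.toList.length with hn
    -- A side: reduce to a map over List.range n
    have hA : conret_table_for_block_down (f :: rest) =
        (List.range n).map (fun (k : Nat) => String.ofList ((f :: rest).reverse.map
          (fun line => (PySem.Str.pyGet? line ((k : Nat) : Int)).getD ' '))) := by
      unfold conret_table_for_block_down
      simp only [PySem.List.pyGet?_zero_cons, Option.getD_some, PySem.Str.len_eq, hn]
      rw [PySem.List.pyRange_zero_natCast, List.foldl_map]
      rw [show (fun (ret : List String) (k : Nat) => ret ++
            [String.ofList ((f :: rest).reverse.foldl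
              (fun nl line => nl ++ [(PySem.Str.pyGet? line (k : Int)).getD ' ']) [])]) =
          (fun (ret : List String) (k : Nat) => ret ++
            [(fun k : Nat => String.ofList ((f :: rest).reverse.map
              (fun line => (PySem.Str.pyGet? line (k : Int)).getD ' '))) k]) from by
        funext ret k
        rw [PySem.List.foldl_append_singleton_eq_map, List.nil_append]]
      rw [PySem.List.foldl_append_singleton_eq_map, List.nil_append]
    -- B side: reduce the row-major fold to the same map
    have hB : conret_table_for_block_down_alt (f :: rest) =
        (List.range n).map (fun (k : Nat) => String.ofList ((f :: rest).reverse.map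
          (fun line => (PySem.Str.pyGet? line ((k : Nat) : Int)).getD ' '))) := by
      simp only [hn]
      unfold conret_table_for_block_down_alt
      simp only [PySem.List.pyGet?_zero_cons, Option.getD_some, PySem.Str.len_eq,
        Int.toNat_natCast]
      rw [show (List.replicate f.toList.length ([] : List Char)) =
            (List.range f.toList.length).map (fun _ => ([] : List Char)) from by simp]
      rw [show (fun (acc : List (List Char)) (line : String) =>
          (PySem.List.pyRange 0 (f.toList.length : Int) 1).foldl
            (fun a j => a.set j.toNat (a.getD j.toNat [] ++ [(PySem.Str.pyGet? line j).getD ' ']))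
            acc) =
          (fun (acc : List (List Char)) (line : String) =>
            (List.range f.toList.length).foldl
              (fun a j => a.set j (a.getD j [] ++ [(PySem.Str.pyGet? line (j : Int)).getD ' ']))
              acc) from by
        funext acc line
        rw [PySem.List.pyRange_zero_natCast, List.foldl_map]
        simp]
      rw [outer_fold_eq f.toList.length (f :: rest) (fun _ => ([] : List Char))]
      rw [List.map_map]
      apply List.map_congr_left
      intro k _
      simp
    rw [hA, hB]
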